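-- pv_equiv track=rewrite | github.com/untletch/aoc2019 | day4/day4.py | num_rep
-- ===== SOURCE A (Python) =====
-- def num_rep(n):
--     count = 1
--     s = str(n)
--     ans = {}
--     for i in range(len(s) - 1):
--         if s[i] == s[i + 1]:
--             count += 1
--             ans[s[i]] = count
--         else:
--             count = 1
--     for i in ans.values():
--         if i == 2:
--             return True
--     return False
-- ===== SOURCE B (Python) =====
-- def num_rep(n):
--     s = str(n)
--     last = {}          # char -> length of its LAST maximal run of length >= 2
--     i = 0
--     while i < len(s):
--         j = i + 1
--         while j < len(s) and s[j] == s[i]: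
--             j += 1
--         if j - i >= 2:
--             last[s[i]] = j - i
--         i = j
--     return 2 in last.values()
-- ===== Notes on version B (the rewrite author's own statement) =====
-- stated objective: alternative
-- what changed: B extracts maximal runs directly with a nested run-skipping scan and records each digit's last long run once, instead of A's pairwise comparison that increments a counter and rewrites the dict entry on every step of a run.
import Mathlib
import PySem

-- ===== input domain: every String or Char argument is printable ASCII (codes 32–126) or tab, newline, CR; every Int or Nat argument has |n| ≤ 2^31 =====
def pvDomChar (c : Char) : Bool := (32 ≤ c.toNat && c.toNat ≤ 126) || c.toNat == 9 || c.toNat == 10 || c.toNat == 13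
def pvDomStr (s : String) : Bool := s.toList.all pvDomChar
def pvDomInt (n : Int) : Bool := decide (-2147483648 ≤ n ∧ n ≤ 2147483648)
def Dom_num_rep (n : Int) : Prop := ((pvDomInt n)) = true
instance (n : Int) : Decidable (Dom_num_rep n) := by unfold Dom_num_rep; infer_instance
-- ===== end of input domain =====

-- B records each digit's last maximal run of length >= 2 by skipping whole runs; A walks
-- adjacent pairs with a counter, rewriting the dict entry at every step of a run.
-- Same return value; B is an alternative decomposition (no speed claim).

-- ===== PORT A =====
-- the for-loop over range(len(s)-1) comparing s[i], s[i+1]: recursion over adjacent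
-- pairs of the character list, carrying the same state (count, ans)
def numRepLoopA : List Char → Int → PySem.Dict Char Int → PySem.Dict Char Int
  | c1 :: c2 :: rest, count, ans =>
      if c1 == c2 then numRepLoopA (c2 :: rest) (count + 1) (ans.insert c1 (count + 1))
      else numRepLoopA (c2 :: rest) 1 ans
  | _, _, ans => ans

def num_rep (n : Int) : Bool :=
  let s := PySem.Int.toStr n
  let ans := numRepLoopA s.toList 1 PySem.Dict.empty
  -- 'for i in ans.values(): if i == 2: return True' / 'return False'
  ans.values.any (fun i => i == 2)

-- ===== PORT B =====
-- outer while: one step per maximal run; inner while j: span of equal chars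
def numRepLoopB : List Char → PySem.Dict Char Int → PySem.Dict Char Int
  | [], last => last
  | c :: rest, last =>
      let sp := rest.span (fun x => x == c)
      let run : Int := 1 + sp.1.length
      numRepLoopB sp.2 (if 2 ≤ run then last.insert c run else last)
  termination_by cs => cs.length
  decreasing_by
    simp only [List.span_eq_takeWhile_dropWhile]
    exact Nat.lt_succ_of_le (List.length_dropWhile_le _ _)

def num_rep_alt (n : Int) : Bool :=
  let s := PySem.Int.toStr n
  let last := numRepLoopB s.toList PySem.Dict.empty
  last.values.contains 2

-- ===== PRECONDITION & SPEC =====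
def Spec_num_rep (n : Int) (out : Bool) : Prop := out = num_rep_alt n
instance (n : Int) (out : Bool) : Decidable (Spec_num_rep n out) := by unfold Spec_num_rep; infer_instance

-- ===== CLAIM (what is proved, stated in full; the proofs are below) =====
def Claim_equal_num_rep : Prop := ∀ (n : Int), Dom_num_rep n → Spec_num_rep n (num_rep n)

-- ===== LEMMAS AND PROOFS =====

-- consuming one whole run in A's pairwise loop: same = the rest of the current run,
-- rest' starts with a different char (or is empty)
theorem loopA_run (c : Char) (same : List Char) (hsame : ∀ x ∈ same, x = c) :
    ∀ (rest' : List Char), (∀ r t, rest' = r :: t → r ≠ c) → ∀ (count : Int) (d : PySem.Dict Char Int),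
    numRepLoopA (c :: same ++ rest') count d =
      numRepLoopA rest' 1 (if same = [] then d else d.insert c (count + same.length)) := by
  induction same generalizing c with
  | nil =>
      intro rest' hrest' count d
      cases rest' with
      | nil => simp [numRepLoopA]
      | cons r t =>
          have hrc : (c == r) = false := by
            have := hrest' r t rfl
            simp only [beq_eq_false_iff_ne, ne_eq]
            exact fun h => this h.symm
          simp [numRepLoopA, hrc]
  | cons c2 same' ih =>
      intro rest' hrest' count d
      have hc2 : c2 = c := hsame c2 (by simp)
      subst hc2
      have hsame' : ∀ x ∈ same', x = c2 := fun x hx => hsame x (by simp [hx])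
      have step : numRepLoopA (c2 :: c2 :: same' ++ rest') count d =
          numRepLoopA (c2 :: same' ++ rest') (count + 1) (d.insert c2 (count + 1)) := by
        simp [numRepLoopA]
      rw [show (c2 :: (c2 :: same') ++ rest') = (c2 :: c2 :: same' ++ rest') by simp, step,
          ih c2 hsame' rest' hrest' (count + 1) (d.insert c2 (count + 1))]
      by_cases h : same' = []
      · subst h; simp
      · simp only [h, if_false, List.cons_ne_nil]
        rw [PySem.Dict.insert_insert_self]
        congr 2 <;> first
          | rfl
          | (simp only [List.length_cons]; push_cast; ring)

-- the two loops build the same dict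
theorem loopA_eq_loopB : ∀ (cs : List Char) (d : PySem.Dict Char Int),
    numRepLoopA cs 1 d = numRepLoopB cs d := by
  intro cs d
  induction cs, d using numRepLoopB.induct with
  | case1 d => simp [numRepLoopA, numRepLoopB]
  | case2 c rest d sp run ih =>
      -- note: the eliminator fixes sp := rest.span (· == c), run := 1 + sp.1.length
      have hspan : rest.span (fun x => x == c) = (rest.takeWhile (fun x => x == c), rest.dropWhile (fun x => x == c)) :=
        List.span_eq_takeWhile_dropWhile _ _
      have hsame : ∀ x ∈ rest.takeWhile (fun x => x == c), x = c := by
        intro x hx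
        have := List.mem_takeWhile_imp hx
        simpa [beq_iff_eq] using this
      have hsplit : rest = rest.takeWhile (fun x => x == c) ++ rest.dropWhile (fun x => x == c) :=
        (List.takeWhile_append_dropWhile).symm
      have hrest' : ∀ r t, rest.dropWhile (fun x => x == c) = r :: t → r ≠ c := by
        intro r t h
        have := List.head?_dropWhile_not (p := fun x => x == c) (l := rest)
        rw [h] at this
        simpa [beq_iff_eq] using this
      have hA : numRepLoopA (c :: rest) 1 d =
          numRepLoopA (rest.dropWhile (fun x => x == c)) 1
            (if rest.takeWhile (fun x => x == c) = [] then d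
             else d.insert c (1 + (rest.takeWhile (fun x => x == c)).length)) := by
        conv_lhs => rw [hsplit]
        exact loopA_run c _ hsame _ hrest' 1 d
      have hdict : (if rest.takeWhile (fun x => x == c) = [] then d
             else d.insert c (1 + ((rest.takeWhile (fun x => x == c)).length : Int))) =
          (if 2 ≤ run then d.insert c run else d) := by
        simp only [run, sp, hspan]
        by_cases h : rest.takeWhile (fun x => x == c) = []
        · simp [h]
        · have hlen : 1 ≤ (rest.takeWhile (fun x => x == c)).length :=
            List.length_pos_iff.mpr h
          have h2 : (2 : Int) ≤ 1 + ((rest.takeWhile (fun x => x == c)).length : Int) := by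
            omega
          simp [h, h2]
      rw [hA, hdict]
      have hsp2 : sp.2 = rest.dropWhile (fun x => x == c) := by simp [sp]
      simp only [dite_eq_ite] at ih
      rw [← hsp2, ih]
      conv_rhs => rw [numRepLoopB]

-- ===== VERDICT (by name: the statement is the Claim_ definition above) =====
theorem num_rep_spec : Claim_equal_num_rep := by
  intro n _
  show num_rep n = num_rep_alt n
  simp only [num_rep, num_rep_alt, loopA_eq_loopB]
  induction (numRepLoopB (PySem.Int.toStr n).toList PySem.Dict.empty).values with
  | nil => rfl
  | cons v vs ihv =>
      by_cases h : v = 2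
      · subst h; simp
      · have h1 : (v == 2) = false := beq_eq_false_iff_ne.mpr h
        have h2 : ((2 : Int) == v) = false := beq_eq_false_iff_ne.mpr fun he => h he.symm
        simp [List.any_cons, List.contains_cons, ihv, h1, h2]
        exact fun he => absurd he.symm h
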